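-- pv_equiv track=rewrite | github.com/JWTC2200/CS50X-2022 | cs50x/week6/sentimental-credit/credit.py | evens
-- ===== SOURCE A (Python) =====
-- def evens(card_no):
--     length = len(card_no)
--     inter = 0
--     even_string = ""
--     for i in range(int(length/2)):
--         inter -= 2
--         # multiply by 2 then add to string in case answer is 2 digit, i.e. 10, 12 , 14 or 16
--         even_string += str(int(card_no[inter]) * 2)
--     # reset inter to use again
--     inter = 0
--     sum = 0
--     # convert string into numbers and get sum
--     for i in range(len(even_string)):
--         inter -= 1
--         sum += int(even_string[inter])
--     return sum
-- ===== SOURCE B (Python) =====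
-- def evens(card_no):
--     total = 0
--     for i in range(len(card_no) // 2):
--         d = int(card_no[-2 * (i + 1)]) * 2
--         total += d // 10 + d % 10
--     return total
-- ===== Notes on version B (the rewrite author's own statement) =====
-- stated objective: simpler
-- what changed: B does one pass accumulating the digit sum of each doubled digit arithmetically (d//10 + d%10), eliminating A's intermediate string of doubled digits and its second reverse loop over that string's characters.
import Mathlib
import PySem

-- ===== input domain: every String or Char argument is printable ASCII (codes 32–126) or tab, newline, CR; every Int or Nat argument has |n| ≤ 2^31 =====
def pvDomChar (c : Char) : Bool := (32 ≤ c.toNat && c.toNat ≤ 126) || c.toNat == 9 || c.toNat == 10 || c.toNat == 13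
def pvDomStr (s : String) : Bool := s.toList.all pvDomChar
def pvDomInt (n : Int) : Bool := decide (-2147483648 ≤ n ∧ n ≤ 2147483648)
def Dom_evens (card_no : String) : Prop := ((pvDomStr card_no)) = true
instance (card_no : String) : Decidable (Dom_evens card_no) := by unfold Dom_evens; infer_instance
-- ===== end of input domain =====

-- B replaces A's intermediate string of doubled digits and second reverse loop by a single
-- arithmetic pass (digit sum of the doubled digit as d//10 + d%10); objective: simpler.


-- value of int(<one-char string>), defaulting to 0 (Pre_ rules the default out)
def pvCharVal (c : Char) : Int := (PySem.Int.ofChars? [c]).getD 0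

-- ===== PORT A =====
def evens (card_no : String) : Int :=
  let cs := card_no.toList
  let length : Int := cs.length
  -- first loop: build even_string from the doubled even-position digits (right to left)
  let st1 := (PySem.List.pyRange 0 (PySem.Int.floordiv length 2) 1).foldl
    (fun (st : Int × List Char) _ =>
      (st.1 - 2, st.2 ++ PySem.Int.toChars (pvCharVal ((PySem.List.pyGet? cs (st.1 - 2)).getD ' ') * 2)))
    (0, [])
  let evenString := st1.2
  -- second loop: sum the characters of even_string right to left
  let st2 := (PySem.List.pyRange 0 ((evenString.length : Int)) 1).foldl
    (fun (st : Int × Int) _ =>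
      (st.1 - 1, st.2 + pvCharVal ((PySem.List.pyGet? evenString (st.1 - 1)).getD ' ')))
    (0, 0)
  st2.2

-- ===== PORT B =====
def evens_alt (card_no : String) : Int :=
  let cs := card_no.toList
  (PySem.List.pyRange 0 (PySem.Int.floordiv (cs.length : Int) 2) 1).foldl
    (fun total i =>
      total + PySem.Int.floordiv (pvCharVal ((PySem.List.pyGet? cs (-2 * (i + 1))).getD ' ') * 2) 10
            + PySem.Int.mod (pvCharVal ((PySem.List.pyGet? cs (-2 * (i + 1))).getD ' ') * 2) 10)
    0

-- ===== PRECONDITION & SPEC =====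
-- Pre_: every character A reads (positions -2, -4, … from the right) is a decimal digit;
-- on any other input Python's int() raises ValueError (in A and in B alike).
def Pre_evens (card_no : String) : Prop :=
  ((List.range (card_no.toList.length / 2)).all
    (fun j => PySem.Str.isdigit
      (card_no.toList.getD (card_no.toList.length - 2 * (j + 1)) ' '))) = true
instance (card_no : String) : Decidable (Pre_evens card_no) := by unfold Pre_evens; infer_instance
def pvWitness_evens : String := "4003600000000014"

def Spec_evens (card_no : String) (out : Int) : Prop := out = evens_alt card_no
instance (card_no : String) (out : Int) : Decidable (Spec_evens card_no out) := by unfold Spec_evens; infer_instance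

-- ===== CLAIM (what is proved, stated in full; the proofs are below) =====
def Claim_equal_evens : Prop := ∀ (card_no : String), Dom_evens card_no → Pre_evens card_no → Spec_evens card_no (evens card_no)

-- ===== LEMMAS AND PROOFS =====

-- negative Python index: s[-t] is s[len - t] when 0 < t ≤ len
theorem pvGet_neg (s : List Char) (t : Nat) (h0 : 0 < t) (hle : t ≤ s.length) :
    PySem.List.pyGet? s (-(t : Int)) = some s[s.length - t] := by
  simp [PySem.List.pyGet?, PySem.List.pyIdx?]
  rw [if_neg (by omega : ¬ t = 0), if_pos hle]
  simp [List.getElem?_eq_getElem (by omega : s.length - t < s.length)]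

-- the j-th doubled even-position digit, and its str() piece
def pvD (cs : List Char) (j : Nat) : Int :=
  pvCharVal ((PySem.List.pyGet? cs (-2 * ((j : Nat) + 1 : Int))).getD ' ')
def pvPiece (cs : List Char) (j : Nat) : List Char :=
  PySem.Int.toChars (pvD cs j * 2)

-- first loop of A: after k iterations, inter = -2k and even_string = the k pieces concatenated
theorem pvLoop1 (cs : List Char) (k : Nat) :
    ((PySem.List.pyRange 0 (k : Int) 1).foldl
      (fun (st : Int × List Char) _ =>
        (st.1 - 2, st.2 ++ PySem.Int.toChars (pvCharVal ((PySem.List.pyGet? cs (st.1 - 2)).getD ' ') * 2)))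
      (0, []))
    = (-(2 * (k : Int)), (List.range k).flatMap (pvPiece cs)) := by
  induction k with
  | zero => rfl
  | succ k ih =>
    have hc : ((k + 1 : Nat) : Int) = (k : Int) + 1 := by push_cast; ring
    rw [hc, PySem.List.pyRange_one_succ_right (by positivity), List.foldl_append, ih]
    simp only [List.foldl_cons, List.foldl_nil, List.range_succ, List.flatMap_append,
      List.flatMap_cons, List.flatMap_nil, List.append_nil]
    refine Prod.ext (by simp; ring) ?_
    simp only [pvPiece, pvD]
    have : (-(2 * (k : Int)) - 2) = -2 * ((k : Nat) + 1 : Int) := by ring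
    rw [this]

-- second loop of A: summing the characters right to left is the sum of their values
theorem pvLoop2aux (s : List Char) (k : Nat) (hk : k ≤ s.length) :
    ((PySem.List.pyRange 0 (k : Int) 1).foldl
      (fun (st : Int × Int) _ =>
        (st.1 - 1, st.2 + pvCharVal ((PySem.List.pyGet? s (st.1 - 1)).getD ' ')))
      (0, 0))
    = (-(k : Int), ((s.drop (s.length - k)).map pvCharVal).sum) := by
  induction k with
  | zero => simp
  | succ k ih =>
    have ih' := ih (by omega)
    have hc : ((k + 1 : Nat) : Int) = (k : Int) + 1 := by push_cast; ring
    rw [hc, PySem.List.pyRange_one_succ_right (by positivity), List.foldl_append, ih']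
    simp only [List.foldl_cons, List.foldl_nil]
    refine Prod.ext (by simp; ring) ?_
    have hidx : (-(k : Int) - 1) = -((k + 1 : Nat) : Int) := by push_cast; ring
    rw [hidx, pvGet_neg s (k + 1) (by omega) (by omega)]
    rw [List.drop_eq_getElem_cons (by omega : s.length - (k + 1) < s.length)]
    have : s.length - (k + 1) + 1 = s.length - k := by omega
    rw [this]
    simp
    ring

theorem pvLoop2 (s : List Char) :
    ((PySem.List.pyRange 0 ((s.length : Nat) : Int) 1).foldl
      (fun (st : Int × Int) _ =>
        (st.1 - 1, st.2 + pvCharVal ((PySem.List.pyGet? s (st.1 - 1)).getD ' ')))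
      (0, 0)).2 = (s.map pvCharVal).sum := by
  rw [pvLoop2aux s s.length le_rfl]
  simp

-- B's loop is the sum of the per-digit contributions
theorem pvLoopB (cs : List Char) (k : Nat) :
    ((PySem.List.pyRange 0 (k : Int) 1).foldl
      (fun total i =>
        total + PySem.Int.floordiv (pvCharVal ((PySem.List.pyGet? cs (-2 * (i + 1))).getD ' ') * 2) 10
              + PySem.Int.mod (pvCharVal ((PySem.List.pyGet? cs (-2 * (i + 1))).getD ' ') * 2) 10)
      0)
    = ((List.range k).map (fun j =>
        PySem.Int.floordiv (pvD cs j * 2) 10 + PySem.Int.mod (pvD cs j * 2) 10)).sum := by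
  induction k with
  | zero => rfl
  | succ k ih =>
    have hc : ((k + 1 : Nat) : Int) = (k : Int) + 1 := by push_cast; ring
    rw [hc, PySem.List.pyRange_one_succ_right (by positivity), List.foldl_append, ih]
    simp only [List.foldl_cons, List.foldl_nil, List.range_succ, List.map_append,
      List.map_cons, List.map_nil, List.sum_append, List.sum_cons, List.sum_nil]
    simp [pvD]
    ring

-- a digit character's int() value lies in [0, 9]
theorem pvCharVal_digit (c : Char) (h : PySem.Str.isdigit c = true) :
    0 ≤ pvCharVal c ∧ pvCharVal c ≤ 9 := by
  simp [PySem.Str.isdigit, PySem.Chars.isdigit] at h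
  obtain ⟨h1, h2⟩ := h
  have hlo : 48 ≤ c.toNat := h1
  have hhi : c.toNat ≤ 57 := h2
  interval_cases hn : c.toNat <;>
    · have : c = Char.ofNat c.toNat := by rw [Char.ofNat_toNat]
      rw [hn] at this
      subst this
      decide

set_option maxHeartbeats 1000000 in
-- digit sum of str(2*d) equals (2*d)//10 + (2*d)%10 for a digit d
theorem pvPieceSum (d : Int) (h0 : 0 ≤ d) (h9 : d ≤ 9) :
    ((PySem.Int.toChars (d * 2)).map pvCharVal).sum
      = PySem.Int.floordiv (d * 2) 10 + PySem.Int.mod (d * 2) 10 := by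
  interval_cases d <;> decide

-- sum over a flatMap decomposes piecewise
theorem pvSumFlatMap (l : List Nat) (f : Nat → List Char) :
    ((l.flatMap f).map pvCharVal).sum = (l.map (fun a => ((f a).map pvCharVal).sum)).sum := by
  induction l with
  | nil => rfl
  | cons a t ih => simp [List.flatMap_cons, ih]

-- ===== VERDICT (by name: the statement is the Claim_ definition above) =====
theorem evens_spec : Claim_equal_evens := by
  intro card_no _ hpre
  unfold Spec_evens evens evens_alt
  simp only []
  set cs := card_no.toList with hcs
  have hfd : PySem.Int.floordiv ((cs.length : Nat) : Int) 2 = ((cs.length / 2 : Nat) : Int) := by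
    exact_mod_cast PySem.Int.floordiv_natCast cs.length 2
  rw [hfd, pvLoop1 cs (cs.length / 2)]
  rw [pvLoop2 ((List.range (cs.length / 2)).flatMap (pvPiece cs))]
  rw [pvLoopB cs (cs.length / 2)]
  rw [pvSumFlatMap]
  refine congrArg List.sum (List.map_congr_left ?_)
  intro j hj
  have hjm : j < cs.length / 2 := List.mem_range.mp hj
  have hle : 2 * (j + 1) ≤ cs.length := by omega
  -- the j-th read character is cs[len - 2(j+1)], a digit by Pre_
  have hidx : (-2 * ((j : Nat) + 1 : Int)) = -((2 * (j + 1) : Nat) : Int) := by push_cast; ring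
  have hget : pvD cs j = pvCharVal cs[cs.length - 2 * (j + 1)] := by
    simp only [pvD, hidx, pvGet_neg cs (2 * (j + 1)) (by omega) hle, Option.getD_some]
  have hdig : PySem.Str.isdigit cs[cs.length - 2 * (j + 1)] = true := by
    have h := (List.all_eq_true.mp hpre) j hj
    rwa [List.getD_eq_getElem _ _ (by omega : cs.length - 2 * (j + 1) < cs.length)] at h
  obtain ⟨h0, h9⟩ := pvCharVal_digit _ hdig
  simp only [pvPiece, hget]
  exact pvPieceSum _ h0 h9
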